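-- pv_equiv track=rewrite | github.com/ETGrif/MonoMatchEnglish | Attempt 1/anagramDistance.py | stringDifference
-- ===== SOURCE A (Python) =====
-- blist = []
--
-- def stringDifference(a, b):
--     delete, insert = [],[]
--     a = list(a)
--     b = list(b)
--     for e in b: insert.append(e)
--
--     for i in a:
--         if i.lower() in b:
--             insert.remove(i.lower())
--         else:
--             delete.append(i)
--
--     doable = True
--     for i in delete:
--         if not i.islower() or i in blist:
--             doable = False
--     for i in insert:
--         if i in blist:
--             doable = False
--     return (delete, insert, doable)
-- ===== SOURCE B (Python) =====
-- blist = []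
--
-- def stringDifference(a, b):
--     # O(n+m): set membership + per-char removal counts; rebuild insert by
--     # walking b once, skipping the first remove_cnt[c] occurrences of each c.
--     present = set(b)
--     remove_cnt = {}
--     delete = []
--     for ch in a:
--         lo = ch.lower()
--         if lo in present:
--             remove_cnt[lo] = remove_cnt.get(lo, 0) + 1
--         else:
--             delete.append(ch)
--     insert = []
--     skipped = {}
--     for ch in b:
--         s = skipped.get(ch, 0)
--         if s < remove_cnt.get(ch, 0):
--             skipped[ch] = s + 1
--         else:
--             insert.append(ch)
--     doable = all(ch.islower() and ch not in blist for ch in delete) \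
--         and all(ch not in blist for ch in insert)
--     return (delete, insert, doable)
-- ===== Notes on version B (the rewrite author's own statement) =====
-- stated objective: faster
-- what changed: Replaces A's per-character 'in b' scan and list.remove calls with a set for membership plus per-char removal counters, rebuilding insert in one skip-walk over b, so no inner list scans remain.
import Mathlib
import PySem

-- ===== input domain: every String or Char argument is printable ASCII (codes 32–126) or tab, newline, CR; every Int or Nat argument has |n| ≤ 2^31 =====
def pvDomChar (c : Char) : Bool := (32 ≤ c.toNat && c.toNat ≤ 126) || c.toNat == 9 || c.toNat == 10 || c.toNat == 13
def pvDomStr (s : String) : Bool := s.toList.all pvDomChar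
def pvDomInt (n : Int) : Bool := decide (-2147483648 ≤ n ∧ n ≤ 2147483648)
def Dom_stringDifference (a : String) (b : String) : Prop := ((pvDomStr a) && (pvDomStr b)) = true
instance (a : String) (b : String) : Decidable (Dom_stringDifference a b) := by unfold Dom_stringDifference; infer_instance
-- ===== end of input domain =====

-- B computes the same diff in one pass over each string (set membership + per-char removal
-- counts, then a skip-walk over b) instead of A's per-char list scans; return values only.

-- shared primitive: Python str.islower() — some cased char, every cased char lowercase (exact on ASCII)
def pyStrIslower (s : String) : Bool :=
  s.toList.any (fun c => PySem.Chars.isalpha c) &&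
  s.toList.all (fun c => !(PySem.Chars.isalpha c) || PySem.Chars.islower c)

-- the module-level constant 'blist = []'
def blistLean : List String := []

-- ===== PORT A =====
def stringDifference (a : String) (b : String) : List String × List String × Bool :=
  let aL : List String := a.toList.map (fun c => String.ofList [c])
  let bL : List String := b.toList.map (fun c => String.ofList [c])
  -- for e in b: insert.append(e)
  let insert0 : List String := bL.foldl (fun ins e => ins ++ [e]) []
  -- for i in a: if i.lower() in b: insert.remove(i.lower()) else: delete.append(i)
  -- insert.remove raises ValueError when the value is absent; Pre_ excludes exactly those
  -- inputs, so the .getD default is never taken on admitted inputs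
  let p : List String × List String :=
    aL.foldl (fun (p : List String × List String) i =>
      if PySem.Str.lower i ∈ bL then
        (p.1, (PySem.List.remove? p.2 (PySem.Str.lower i)).getD p.2)
      else
        (p.1 ++ [i], p.2)) ([], insert0)
  let doable1 : Bool :=
    p.1.foldl (fun d i => if !(pyStrIslower i) || decide (i ∈ blistLean) then false else d) true
  let doable2 : Bool :=
    p.2.foldl (fun d i => if decide (i ∈ blistLean) then false else d) doable1
  (p.1, p.2, doable2)

-- ===== PORT B =====
def stringDifference_alt (a : String) (b : String) : List String × List String × Bool :=
  let aL : List String := a.toList.map (fun c => String.ofList [c])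
  let bL : List String := b.toList.map (fun c => String.ofList [c])
  let present : PySem.Set String := PySem.Set.ofList bL
  let st : PySem.Dict String Int × List String :=
    aL.foldl (fun (st : PySem.Dict String Int × List String) ch =>
      let lo := PySem.Str.lower ch
      if PySem.Set.contains present lo then
        (st.1.insert lo (st.1.getD lo 0 + 1), st.2)
      else
        (st.1, st.2 ++ [ch])) (PySem.Dict.empty, [])
  let removeCnt := st.1
  let delete := st.2
  let q : List String × PySem.Dict String Int :=
    bL.foldl (fun (q : List String × PySem.Dict String Int) ch =>
      let s := q.2.getD ch 0
      if s < removeCnt.getD ch 0 then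
        (q.1, q.2.insert ch (s + 1))
      else
        (q.1 ++ [ch], q.2)) ([], PySem.Dict.empty)
  let insert := q.1
  let doable : Bool :=
    delete.all (fun ch => pyStrIslower ch && !(decide (ch ∈ blistLean))) &&
    insert.all (fun ch => !(decide (ch ∈ blistLean)))
  (delete, insert, doable)

-- ===== PRECONDITION & SPEC =====
-- Pre_ excludes exactly the inputs on which A's insert.remove raises ValueError: some char c of b
-- is the lowercase image of more chars of a than b holds copies of c.
def Pre_stringDifference (a : String) (b : String) : Prop :=
  (b.toList.all (fun c =>
    decide (a.toList.countP (fun x => PySem.Chars.lowerChar x == c) ≤ b.toList.count c))) = true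
instance (a : String) (b : String) : Decidable (Pre_stringDifference a b) := by unfold Pre_stringDifference; infer_instance

def pvWitness_stringDifference : String × String := ("A", "ab")

def Spec_stringDifference (a : String) (b : String) (out : List String × List String × Bool) : Prop := out = stringDifference_alt a b
instance (a : String) (b : String) (out : List String × List String × Bool) : Decidable (Spec_stringDifference a b out) := by unfold Spec_stringDifference; infer_instance

-- ===== CLAIM (what is proved, stated in full; the proofs are below) =====
def Claim_equal_stringDifference : Prop := ∀ (a : String) (b : String), Dom_stringDifference a b → Pre_stringDifference a b → Spec_stringDifference a b (stringDifference a b)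

-- ===== LEMMAS AND PROOFS =====

-- b with, for each char c, the first (k c) occurrences of c removed
def skipF (l : List String) (k : String → Nat) : List String :=
  match l with
  | [] => []
  | x :: xs =>
    if k x > 0 then skipF xs (fun y => if y = x then k y - 1 else k y)
    else x :: skipF xs k

theorem skipF_zero (l : List String) : skipF l (fun _ => 0) = l := by
  induction l with
  | nil => rfl
  | cons x xs ih => simp [skipF, ih]

theorem count_skipF (l : List String) (k : String → Nat) (c : String) :
    (skipF l k).count c = l.count c - k c := by
  induction l generalizing k with
  | nil => simp [skipF]
  | cons x xs ih =>
    simp only [skipF]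
    split_ifs with hx
    · rw [ih]
      rcases eq_or_ne c x with h | h
      · subst h; simp; omega
      · simp [h, Ne.symm h]
    · rcases eq_or_ne c x with h | h
      · subst h; simp [ih]; omega
      · simp [ih, Ne.symm h]

theorem mem_skipF (l : List String) (k : String → Nat) (c : String) (h : k c < l.count c) :
    c ∈ skipF l k := by
  have h1 := count_skipF l k c
  have h2 : 0 < (skipF l k).count c := by omega
  exact List.count_pos_iff.mp h2

theorem erase_skipF (l : List String) (k : String → Nat) (c : String) (h : k c < l.count c) :
    (skipF l k).erase c = skipF l (fun y => if y = c then k y + 1 else k y) := by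
  induction l generalizing k with
  | nil => simp at h
  | cons x xs ih =>
    simp only [skipF]
    by_cases hx : k x > 0
    · have hx' : (if x = c then k x + 1 else k x) > 0 := by split_ifs <;> omega
      rw [if_pos hx, if_pos hx']
      have hlt : (fun y => if y = x then k y - 1 else k y) c < xs.count c := by
        rcases eq_or_ne c x with hcx | hcx
        · subst hcx; simp at h ⊢; omega
        · simp only [if_neg hcx]; simp [Ne.symm hcx] at h; omega
      rw [ih _ hlt]
      congr 1
      funext y
      by_cases hyx : y = x
      · subst hyx
        by_cases hyc : y = c
        · subst hyc; simp; omega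
        · simp [hyc]
      · by_cases hyc : y = c
        · subst hyc; simp [hyx]
        · simp [hyx, hyc]
    · rw [if_neg hx]
      rcases eq_or_ne x c with hxc | hxc
      · subst hxc
        have hx2 : (if x = x then k x + 1 else k x) > 0 := by simp
        rw [if_pos hx2, List.erase_cons_head]
        congr 1
        funext y
        by_cases hyx : y = x
        · subst hyx; simp
        · simp [hyx]
      · have hx2 : ¬ ((if x = c then k x + 1 else k x) > 0) := by rw [if_neg hxc]; omega
        rw [if_neg hx2, List.erase_cons_tail (by simp [hxc])]
        have hlt : k c < xs.count c := by simp [hxc] at h; omega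
        rw [ih _ hlt]

-- how many removals the chars of l request at c (only chars whose lowercase is in bL remove)
def needs (bL : List String) (l : List String) (c : String) : Nat :=
  l.countP (fun i => PySem.Str.lower i == c && decide (PySem.Str.lower i ∈ bL))

theorem needs_nil (bL : List String) (c : String) : needs bL [] c = 0 := rfl

theorem needs_cons (bL : List String) (i : String) (l : List String) (c : String) :
    needs bL (i :: l) c =
      (if PySem.Str.lower i = c ∧ PySem.Str.lower i ∈ bL then 1 else 0) + needs bL l c := by
  simp only [needs, List.countP_cons]
  by_cases h1 : PySem.Str.lower i = c <;> by_cases h2 : PySem.Str.lower i ∈ bL <;>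
    simp [h1, h2] <;> omega

-- A's main loop, characterized: deletions filter, removals accumulate into skip counts
theorem loopA (bL : List String) (l : List String) (d0 : List String) (k : String → Nat)
    (H : ∀ c ∈ bL, k c + needs bL l c ≤ bL.count c) :
    l.foldl (fun (p : List String × List String) i =>
      if PySem.Str.lower i ∈ bL then
        (p.1, (PySem.List.remove? p.2 (PySem.Str.lower i)).getD p.2)
      else
        (p.1 ++ [i], p.2)) (d0, skipF bL k)
    = (d0 ++ l.filter (fun i => !(decide (PySem.Str.lower i ∈ bL))),
       skipF bL (fun c => k c + needs bL l c)) := by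
  induction l generalizing d0 k with
  | nil =>
    simp only [List.foldl_nil, List.filter_nil, List.append_nil, needs_nil]
    simp
  | cons i rest ih =>
    by_cases hmem : PySem.Str.lower i ∈ bL
    · have hcnt : k (PySem.Str.lower i) < bL.count (PySem.Str.lower i) := by
        have h1 := H (PySem.Str.lower i) hmem
        rw [needs_cons] at h1
        simp [hmem] at h1
        omega
      have hrem : PySem.List.remove? (skipF bL k) (PySem.Str.lower i)
          = some ((skipF bL k).erase (PySem.Str.lower i)) :=
        PySem.List.remove?_eq_some_erase _ _ (mem_skipF bL k _ hcnt)
      simp only [List.foldl_cons, if_pos hmem, hrem, Option.getD_some]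
      rw [erase_skipF bL k _ hcnt]
      rw [ih d0 (fun y => if y = PySem.Str.lower i then k y + 1 else k y)
        (by
          intro c hc
          have h1 := H c hc
          rw [needs_cons] at h1
          by_cases hci : c = PySem.Str.lower i
          · subst hci; simp [hmem] at h1 ⊢; omega
          · have h0 : ¬ (PySem.Str.lower i = c ∧ PySem.Str.lower i ∈ bL) := by
              intro hh; exact hci (hh.1.symm)
            simp only [if_neg hci]
            simp only [if_neg h0] at h1
            omega)]
      congr 1
      · simp [hmem]
      · congr 1
        funext c
        rw [needs_cons]
        by_cases hci : c = PySem.Str.lower i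
        · subst hci; simp [hmem]; omega
        · have h0 : ¬ (PySem.Str.lower i = c ∧ PySem.Str.lower i ∈ bL) := by
            intro hh; exact hci (hh.1.symm)
          simp only [if_neg hci, if_neg h0]
          omega
    · simp only [List.foldl_cons, if_neg hmem]
      rw [ih (d0 ++ [i]) k
        (by
          intro c hc
          have h1 := H c hc
          rw [needs_cons] at h1
          omega)]
      congr 1
      · simp [hmem]
      · congr 1
        funext c
        rw [needs_cons]
        have h0 : ¬ (PySem.Str.lower i = c ∧ PySem.Str.lower i ∈ bL) := fun hh => hmem hh.2
        simp only [if_neg h0]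
        omega

-- B's first loop: pair fold splits into a dict fold and the delete filter
theorem loopB1 (bL : List String) (l : List String) (d : PySem.Dict String Int) (del0 : List String) :
    (l.foldl (fun (st : PySem.Dict String Int × List String) ch =>
      if PySem.Set.contains (PySem.Set.ofList bL) (PySem.Str.lower ch) then
        (st.1.insert (PySem.Str.lower ch) (st.1.getD (PySem.Str.lower ch) 0 + 1), st.2)
      else
        (st.1, st.2 ++ [ch])) (d, del0))
    = ((l.foldl (fun (dd : PySem.Dict String Int) ch =>
          if PySem.Set.contains (PySem.Set.ofList bL) (PySem.Str.lower ch) then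
            dd.insert (PySem.Str.lower ch) (dd.getD (PySem.Str.lower ch) 0 + 1) else dd) d),
       del0 ++ l.filter (fun i => !(decide (PySem.Str.lower i ∈ bL)))) := by
  induction l generalizing d del0 with
  | nil => simp
  | cons ch rest ih =>
    by_cases hmem : PySem.Str.lower ch ∈ bL
    · have hc : PySem.Set.contains (PySem.Set.ofList bL) (PySem.Str.lower ch) = true := by
        rw [PySem.Set.contains_iff]
        exact (PySem.Set.mem_ofList _ _).mpr hmem
      simp only [List.foldl_cons, hc, if_true]
      rw [ih]
      simp [hmem]
    · have hc : PySem.Set.contains (PySem.Set.ofList bL) (PySem.Str.lower ch) = false := by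
        rw [Bool.eq_false_iff]
        intro hcc
        rw [PySem.Set.contains_iff] at hcc
        exact hmem ((PySem.Set.mem_ofList _ _).mp hcc)
      simp only [List.foldl_cons, hc, if_false]
      rw [ih]
      simp [hmem]

-- the counting dict of B's first loop holds exactly the removal requests
theorem getD_loopB1 (bL : List String) (l : List String) (d : PySem.Dict String Int) (c : String) :
    (l.foldl (fun (dd : PySem.Dict String Int) ch =>
        if PySem.Set.contains (PySem.Set.ofList bL) (PySem.Str.lower ch) then
          dd.insert (PySem.Str.lower ch) (dd.getD (PySem.Str.lower ch) 0 + 1) else dd) d).getD c 0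
      = d.getD c 0 + (needs bL l c : Int) := by
  induction l generalizing d with
  | nil => simp [needs_nil]
  | cons ch rest ih =>
    by_cases hmem : PySem.Str.lower ch ∈ bL
    · have hc : PySem.Set.contains (PySem.Set.ofList bL) (PySem.Str.lower ch) = true := by
        rw [PySem.Set.contains_iff]
        exact (PySem.Set.mem_ofList _ _).mpr hmem
      simp only [List.foldl_cons, hc, if_true]
      rw [ih, needs_cons]
      by_cases hci : PySem.Str.lower ch = c
      · subst hci
        rw [PySem.Dict.getD_insert_self]
        simp [hmem]
        ring
      · rw [PySem.Dict.getD_insert_of_ne]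
        · simp [hci, hmem]
        · first | exact hci | exact Ne.symm hci
    · have hc : PySem.Set.contains (PySem.Set.ofList bL) (PySem.Str.lower ch) = false := by
        rw [Bool.eq_false_iff]
        intro hcc
        rw [PySem.Set.contains_iff] at hcc
        exact hmem ((PySem.Set.mem_ofList _ _).mp hcc)
      simp only [List.foldl_cons, hc, if_false]
      rw [ih, needs_cons]
      simp [hmem]

-- B's second loop is the skip-walk
theorem loopB2 (n : String → Nat) (cnt : PySem.Dict String Int)
    (hcnt : ∀ c, cnt.getD c 0 = (n c : Int)) :
    ∀ (bl : List String) (ins0 : List String) (sk : PySem.Dict String Int) (g : String → Nat),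
    (∀ c, sk.getD c 0 = (g c : Int)) →
    (bl.foldl (fun (q : List String × PySem.Dict String Int) ch =>
      if q.2.getD ch 0 < cnt.getD ch 0 then
        (q.1, q.2.insert ch (q.2.getD ch 0 + 1))
      else
        (q.1 ++ [ch], q.2)) (ins0, sk)).1
    = ins0 ++ skipF bl (fun c => n c - g c) := by
  intro bl
  induction bl with
  | nil => intro ins0 sk g hg; simp [skipF]
  | cons x xs ih =>
    intro ins0 sk g hg
    by_cases hlt : g x < n x
    · have hc : sk.getD x 0 < cnt.getD x 0 := by
        rw [hg, hcnt]
        exact_mod_cast hlt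
      simp only [List.foldl_cons]
      rw [if_pos hc]
      rw [ih ins0 (sk.insert x (sk.getD x 0 + 1)) (fun y => if y = x then g y + 1 else g y)
        (by
          intro c
          by_cases hcx : c = x
          · subst hcx
            rw [PySem.Dict.getD_insert_self, hg]
            simp
          · rw [PySem.Dict.getD_insert_of_ne, hg]
            · simp [hcx]
            · first | exact hcx | exact Ne.symm hcx)]
      have hpos : n x - g x > 0 := by omega
      have hsk : skipF (x :: xs) (fun c => n c - g c)
          = skipF xs (fun y => if y = x then (n y - g y) - 1 else n y - g y) := by
        simp only [skipF, if_pos hpos]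
      rw [hsk]
      congr 2
      funext y
      by_cases hyx : y = x
      · subst hyx; simp; omega
      · simp [hyx]
    · have hc : ¬ (sk.getD x 0 < cnt.getD x 0) := by
        rw [hg, hcnt]
        exact_mod_cast hlt
      simp only [List.foldl_cons]
      rw [if_neg hc]
      rw [ih (ins0 ++ [x]) sk g hg]
      have hz : ¬ ((fun c => n c - g c) x > 0) := by simp; omega
      have hsk : skipF (x :: xs) (fun c => n c - g c) = x :: skipF xs (fun c => n c - g c) := by
        simp only [skipF]
        rw [if_neg hz]
      rw [hsk]
      simp

-- A's doable loops: a fold that can only switch to false is an 'all'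
theorem foldl_false (C : String → Bool) (l : List String) (d0 : Bool) :
    l.foldl (fun d i => if C i then false else d) d0 = (d0 && l.all (fun i => !(C i))) := by
  induction l generalizing d0 with
  | nil => simp
  | cons x xs ih =>
    rw [List.foldl_cons]
    by_cases hx : C x = true
    · rw [if_pos hx, ih, List.all_cons, hx]
      simp
    · have hx' : C x = false := by simpa using hx
      rw [if_neg hx, ih, List.all_cons, hx']
      simp

-- A's insert-building loop is the identity copy
theorem foldl_append_id (l : List String) (acc : List String) :
    l.foldl (fun ins e => ins ++ [e]) acc = acc ++ l := by
  induction l generalizing acc with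
  | nil => simp
  | cons x xs ih => simp [ih]

theorem count_map_singleton (l : List Char) (ch : Char) :
    (l.map (fun c => String.ofList [c])).count (String.ofList [ch]) = l.count ch := by
  induction l with
  | nil => simp
  | cons x xs ih => simp [List.count_cons, ih, String.ofList_inj]

theorem lower_singleton (x : Char) :
    PySem.Str.lower (String.ofList [x]) = String.ofList [PySem.Chars.lowerChar x] := by
  simp [PySem.Str.lower, PySem.Chars.lower]

-- Pre_ gives exactly the count bound loopA needs
theorem needs_le (a b : String) (hpre : Pre_stringDifference a b) :
    ∀ c ∈ (b.toList.map (fun ch => String.ofList [ch])),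
      needs (b.toList.map (fun ch => String.ofList [ch])) (a.toList.map (fun ch => String.ofList [ch])) c
        ≤ (b.toList.map (fun ch => String.ofList [ch])).count c := by
  intro c hc
  obtain ⟨ch, hch, rfl⟩ := List.mem_map.mp hc
  rw [count_map_singleton]
  have hneeds : needs (b.toList.map (fun ch => String.ofList [ch])) (a.toList.map (fun ch => String.ofList [ch])) (String.ofList [ch])
      ≤ a.toList.countP (fun x => PySem.Chars.lowerChar x == ch) := by
    unfold needs
    rw [List.countP_map]
    apply List.countP_mono_left
    intro x _ hx
    simp only [Function.comp_apply, Bool.and_eq_true, beq_iff_eq, lower_singleton,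
      String.ofList_inj] at hx
    simpa using hx.1
  refine le_trans hneeds ?_
  unfold Pre_stringDifference at hpre
  rw [List.all_eq_true] at hpre
  exact of_decide_eq_true (hpre ch hch)

-- ===== VERDICT (by name: the statement is the Claim_ definition above) =====
theorem stringDifference_spec : Claim_equal_stringDifference := by
  intro a b _ hpre
  unfold Spec_stringDifference
  simp only [stringDifference, stringDifference_alt]
  rw [foldl_append_id]
  simp only [List.nil_append]
  have hH : ∀ c ∈ (b.toList.map (fun ch => String.ofList [ch])),
      (fun _ => 0) c + needs (b.toList.map (fun ch => String.ofList [ch])) (a.toList.map (fun ch => String.ofList [ch])) c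
        ≤ (b.toList.map (fun ch => String.ofList [ch])).count c := by
    intro c hc
    simpa using needs_le a b hpre c hc
  have hA := loopA (b.toList.map (fun ch => String.ofList [ch])) (a.toList.map (fun ch => String.ofList [ch])) [] (fun _ => 0) hH
  rw [skipF_zero] at hA
  rw [hA]
  simp only [List.nil_append]
  rw [loopB1]
  simp only [List.nil_append]
  rw [loopB2 (fun c => needs (b.toList.map (fun ch => String.ofList [ch])) (a.toList.map (fun ch => String.ofList [ch])) c)
        _
        (by
          intro c
          rw [getD_loopB1]
          simp)
        _ [] PySem.Dict.empty (fun _ => 0) (by intro c; simp)]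
  simp only [List.nil_append]
  refine congrArg (fun t => (_, t)) ?_
  refine congrArg₂ (fun x y => (x, y)) ?_ ?_
  · congr 1
    funext c
    omega
  · rw [foldl_false, foldl_false]
    simp [blistLean, List.all_eq, Bool.and_comm]
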